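-- pv_equiv track=rewrite | github.com/2384963497/Algorithms-and-data-structures | Code01/067DP_剪贴纸拼字符_优化.py | minus
-- ===== SOURCE A (Python) =====
-- def minus(s, sticker):
--     temp = {}
--     for i in s:
--         temp[i] = temp.get(i, 0) + 1
--     for i in sticker:
--         if temp.get(i) != None:
--             temp[i] -= 1
--     tempS = ""
--     for i in temp:
--         if temp[i] > 0:
--             tempS += i * temp[i]
--     return tempS
-- ===== SOURCE B (Python) =====
-- def minus(s, sticker):
--     seen = []
--     res = ""
--     for c in s:
--         if c not in seen:
--             seen.append(c)
--             cnt = s.count(c) - sticker.count(c)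
--             if cnt > 0:
--                 res += c * cnt
--     return res
-- ===== Notes on version B (the rewrite author's own statement) =====
-- stated objective: alternative
-- what changed: Replaces the mutable frequency dict and three sequential passes (count s, subtract sticker, emit) by a single pass over s with a 'seen' list: for each first occurrence of a character its residual count s.count(c)-sticker.count(c) is computed directly and emitted.
import Mathlib
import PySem

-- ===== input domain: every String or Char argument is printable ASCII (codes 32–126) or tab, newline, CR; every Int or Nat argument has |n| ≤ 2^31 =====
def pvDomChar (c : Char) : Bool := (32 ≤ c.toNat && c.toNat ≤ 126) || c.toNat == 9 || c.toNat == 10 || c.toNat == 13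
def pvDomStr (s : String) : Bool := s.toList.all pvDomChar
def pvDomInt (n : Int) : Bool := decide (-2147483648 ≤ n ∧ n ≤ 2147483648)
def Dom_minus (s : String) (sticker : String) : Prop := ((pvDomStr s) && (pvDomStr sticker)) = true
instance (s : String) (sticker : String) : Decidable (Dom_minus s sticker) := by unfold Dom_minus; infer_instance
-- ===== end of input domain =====

-- B replaces A's frequency dict and three sequential passes by a single pass over s with a 'seen'
-- list, computing each distinct character's residual count by direct count scans (alternative
-- decomposition, not claimed faster).

-- ===== PORT A =====
def minus (s : String) (sticker : String) : String :=
  -- temp = {}; for i in s: temp[i] = temp.get(i, 0) + 1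
  let temp : PySem.Dict Char Int :=
    s.toList.foldl (fun d c => d.insert c (d.getD c 0 + 1)) PySem.Dict.empty
  -- for i in sticker: if temp.get(i) != None: temp[i] -= 1
  -- (the key is present whenever the branch fires, so 'modify c 0 (· - 1)' is exactly temp[i] -= 1)
  let temp2 : PySem.Dict Char Int :=
    sticker.toList.foldl (fun d c => if d.get? c ≠ none then d.modify c 0 (fun v => v - 1) else d) temp
  -- tempS = ""; for i in temp: if temp[i] > 0: tempS += i * temp[i]
  let tempS : List Char :=
    temp2.items.foldl (fun acc p => if p.2 > 0 then acc ++ PySem.List.pyRepeat [p.1] p.2 else acc) []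
  String.mk tempS

-- ===== PORT B =====
def minus_alt (s : String) (sticker : String) : String :=
  let res := s.toList.foldl
    (fun (st : List Char × List Char) c =>
      if c ∈ st.1 then st
      else
        let cnt : Int := (s.toList.count c : Int) - (sticker.toList.count c : Int)
        (st.1 ++ [c], if cnt > 0 then st.2 ++ List.replicate cnt.toNat c else st.2))
    ([], [])
  String.mk res.2

-- ===== PRECONDITION & SPEC =====
def Spec_minus (s : String) (sticker : String) (out : String) : Prop := out = minus_alt s sticker
instance (s : String) (sticker : String) (out : String) : Decidable (Spec_minus s sticker out) := by unfold Spec_minus; infer_instance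

-- ===== CLAIM (what is proved, stated in full; the proofs are below) =====
def Claim_equal_minus : Prop := ∀ (s : String) (sticker : String), Dom_minus s sticker → Spec_minus s sticker (minus s sticker)

-- ===== LEMMAS AND PROOFS =====

-- the residual block one distinct character c contributes to the output
def pvG (sl tl : List Char) (c : Char) : List Char :=
  List.replicate ((sl.count c : Int) - (tl.count c : Int)).toNat c

-- A's sticker-subtraction loop keeps the keys and lowers each present key's value by its sticker count
theorem pv_subLoop (tl : List Char) (d : PySem.Dict Char Int) :
    (tl.foldl (fun d c => if d.get? c ≠ none then d.modify c 0 (fun v => v - 1) else d) d).keys = d.keys ∧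
    ∀ k, (tl.foldl (fun d c => if d.get? c ≠ none then d.modify c 0 (fun v => v - 1) else d) d).getD k 0
        = d.getD k 0 - (if d.contains k then (tl.count k : Int) else 0) := by
  induction tl generalizing d with
  | nil => simp
  | cons c tl ih =>
    simp only [List.foldl_cons]
    by_cases h : d.get? c = none
    · have hc : d.contains c = false := by
        rw [PySem.Dict.contains_eq_isSome_get?, h]; rfl
      simp only [h, ne_eq, not_true_eq_false, if_neg, not_false_eq_true]
      obtain ⟨hk, hv⟩ := ih d
      refine ⟨hk, fun k => ?_⟩
      rw [hv k]
      by_cases hkc : k = c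
      · subst hkc; simp [hc]
      · have : (c :: tl).count k = tl.count k := by
          exact List.count_cons_of_ne (Ne.symm hkc)
        rw [this]
    · have hc : d.contains c = true := by
        rw [PySem.Dict.contains_eq_isSome_get?]
        cases hg : d.get? c with
        | none => exact absurd hg h
        | some v => rfl
      simp only [h, ne_eq, not_false_eq_true, if_pos]
      obtain ⟨hk, hv⟩ := ih (d.modify c 0 (fun v => v - 1))
      rw [PySem.Dict.keys_modify] at hk
      rw [PySem.Dict.keys_insert_of_contains] at hk
      · refine ⟨hk, fun k => ?_⟩
        rw [hv k, PySem.Dict.contains_modify, PySem.Dict.getD_modify]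
        by_cases hkc : k = c
        · subst hkc
          simp only [hc, List.count_cons_self, beq_self_eq_true, Bool.true_or, if_true]
          push_cast
          ring
        · have hbne : (k == c) = false := beq_eq_false_iff_ne.mpr hkc
          simp only [if_neg hkc, hbne, Bool.false_or]
          have : (c :: tl).count k = tl.count k := by
            exact List.count_cons_of_ne (Ne.symm hkc)
          rw [this]
      · exact hc

-- B's loop appends exactly the new distinct characters' residual blocks
theorem pv_bLoop (sl tl : List Char) (l : List Char) (seen out : List Char) :
    ∃ r, PySem.Set.update seen l = seen ++ r ∧
      l.foldl
        (fun (st : List Char × List Char) c =>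
          if c ∈ st.1 then st
          else
            let cnt : Int := (sl.count c : Int) - (tl.count c : Int)
            (st.1 ++ [c], if cnt > 0 then st.2 ++ List.replicate cnt.toNat c else st.2))
        (seen, out)
      = (seen ++ r, out ++ r.flatMap (pvG sl tl)) := by
  induction l generalizing seen out with
  | nil => exact ⟨[], by simp [PySem.Set.update]⟩
  | cons c l ih =>
    rw [List.foldl_cons]
    by_cases hc : c ∈ seen
    · have hadd : PySem.Set.add seen c = seen := by
        simp [PySem.Set.add, PySem.Set.contains, hc]
      obtain ⟨r, hu, hf⟩ := ih seen out
      refine ⟨r, ?_, ?_⟩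
      · show PySem.Set.update (PySem.Set.add seen c) l = seen ++ r
        rw [hadd]; exact hu
      · rw [if_pos (show c ∈ ((seen, out) : List Char × List Char).1 from hc)]
        exact hf
    · have hadd : PySem.Set.add seen c = seen ++ [c] := by
        simp [PySem.Set.add, PySem.Set.contains, hc]
      have hout : (if ((sl.count c : Int) - (tl.count c : Int)) > 0
            then out ++ List.replicate ((sl.count c : Int) - (tl.count c : Int)).toNat c
            else out) = out ++ pvG sl tl c := by
        by_cases hpos : ((sl.count c : Int) - (tl.count c : Int)) > 0
        · simp only [if_pos hpos, pvG]
        · simp only [if_neg hpos, pvG]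
          rw [Int.toNat_of_nonpos (by omega)]
          simp
      obtain ⟨r, hu, hf⟩ := ih (seen ++ [c]) (out ++ pvG sl tl c)
      refine ⟨c :: r, ?_, ?_⟩
      · show PySem.Set.update (PySem.Set.add seen c) l = seen ++ c :: r
        rw [hadd, hu]; simp
      · rw [if_neg (show c ∉ ((seen, out) : List Char × List Char).1 from hc)]
        show List.foldl _ (seen ++ [c],
            if ((sl.count c : Int) - (tl.count c : Int)) > 0
            then out ++ List.replicate ((sl.count c : Int) - (tl.count c : Int)).toNat c
            else out) l = _
        rw [hout, hf]
        simp

theorem pv_B_eq (s sticker : String) :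
    minus_alt s sticker = String.mk ((PySem.Set.ofList s.toList).flatMap (pvG s.toList sticker.toList)) := by
  obtain ⟨r, hu, hf⟩ := pv_bLoop s.toList sticker.toList s.toList [] []
  have hr : PySem.Set.ofList s.toList = r := by
    have h0 : PySem.Set.ofList s.toList = PySem.Set.update [] s.toList := rfl
    rw [h0, hu, List.nil_append]
  show String.mk (List.foldl _ ([], []) s.toList).2 = _
  rw [hf, hr]
  simp

theorem pv_A_eq (s sticker : String) :
    minus s sticker = String.mk ((PySem.Set.ofList s.toList).flatMap (pvG s.toList sticker.toList)) := by
  obtain ⟨hkeys, hval⟩ := pv_subLoop sticker.toList (PySem.Dict.counter s.toList)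
  have hcnt : s.toList.foldl (fun d c => d.insert c (d.getD c 0 + 1)) PySem.Dict.empty
      = PySem.Dict.counter s.toList := PySem.Dict.foldl_insert_getD_add_one_eq_counter s.toList
  show String.mk ((_ : PySem.Dict Char Int).items.foldl
      (fun acc p => if p.2 > 0 then acc ++ PySem.List.pyRepeat [p.1] p.2 else acc) []) = _
  rw [hcnt]
  set T := sticker.toList.foldl
      (fun d c => if d.get? c ≠ none then d.modify c 0 (fun v => v - 1) else d)
      (PySem.Dict.counter s.toList) with hT
  have hk2 : T.keys = PySem.Set.ofList s.toList := by
    rw [hkeys, PySem.Dict.keys_counter]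
  have hnd : T.keys.Nodup := by
    rw [hk2]
    exact PySem.Set.nodup_ofList _
  have hitems : T.items = T.keys.map (fun k => (k, T.getD k 0)) :=
    PySem.Dict.items_eq_map_keys T hnd 0
  have hstep : T.items.foldl
      (fun acc p => if p.2 > 0 then acc ++ PySem.List.pyRepeat [p.1] p.2 else acc) []
      = T.items.foldl (fun acc p => acc ++ List.replicate p.2.toNat p.1) [] := by
    apply PySem.List.foldl_congr_mem
    intro acc p _
    by_cases hpos : p.2 > 0
    · rw [if_pos hpos, PySem.List.pyRepeat_singleton]
    · rw [if_neg hpos, Int.toNat_of_nonpos (by omega)]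
      simp
  rw [hstep, PySem.List.foldl_append_eq_flatMap, List.nil_append, hitems, List.flatMap_map]
  congr 1
  rw [hk2]
  apply List.flatMap_congr
  intro k hk
  have hmem : k ∈ s.toList := (PySem.List.mem_dedup s.toList k).mp hk
  have hcont : (PySem.Dict.counter s.toList).contains k = true := by
    rw [PySem.Dict.contains_counter]
    exact List.elem_eq_true_of_mem hmem
  have : T.getD k 0 = (s.toList.count k : Int) - (sticker.toList.count k : Int) := by
    rw [hval k, PySem.Dict.getD_counter, if_pos hcont]
  rw [this, pvG]

-- ===== VERDICT (by name: the statement is the Claim_ definition above) =====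
theorem minus_spec : Claim_equal_minus := by
  intro s sticker _
  unfold Spec_minus
  rw [pv_A_eq, pv_B_eq]
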